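-- pv_equiv track=rewrite | github.com/Merope03/linear-algebra-practice | GaussianElimination.py | SortZeroRows
-- ===== SOURCE A (Python) =====
-- def getZeroRows(matrix) :
--     ZeroRows = []
--     for m in range(len(matrix)) :
--         if matrix[m] == [0 for i in matrix[m]] :
--             ZeroRows.append(m)
--     return ZeroRows
--
-- def CheckFirstConditionRREF(matrix) :
--     zerorows = getZeroRows(matrix)
--     if not zerorows == [] :
--         for i in range(1, len(zerorows)+1) :
--             if not (len(matrix) - i in zerorows) :
--                 return False
--     return True
--
-- def SortZeroRows(matrix_origin) :
--     matrix = matrix_origin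
--     zerorows = getZeroRows(matrix)
--     if not (zerorows == []) and not CheckFirstConditionRREF(matrix) :
--         modifiedmat = []
--         for m in range(len(matrix)) :
--             if not(m in zerorows) :
--                 modifiedmat.append(matrix[m])
--         for i in range(len(zerorows)) :
--             modifiedmat.append([0 for nums in  matrix[0]])
--         matrix = modifiedmat
--     return matrix
-- ===== SOURCE B (Python) =====
-- def SortZeroRows(matrix_origin):
--     nonzero = []
--     count = 0
--     already_sorted = True
--     for row in matrix_origin:
--         if all(x == 0 for x in row):
--             count += 1
--         else:
--             if count > 0:
--                 already_sorted = False
--             nonzero.append(row)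
--     if count == 0 or already_sorted:
--         return matrix_origin
--     return nonzero + [[0] * len(matrix_origin[0]) for _ in range(count)]
-- ===== Notes on version B (the rewrite author's own statement) =====
-- stated objective: faster
-- what changed: One forward pass that collects non-zero rows, counts zero rows and detects out-of-place zero rows with a boolean, replacing A's index-list construction plus per-index list-membership scans (getZeroRows/CheckFirstConditionRREF).
import Mathlib
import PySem

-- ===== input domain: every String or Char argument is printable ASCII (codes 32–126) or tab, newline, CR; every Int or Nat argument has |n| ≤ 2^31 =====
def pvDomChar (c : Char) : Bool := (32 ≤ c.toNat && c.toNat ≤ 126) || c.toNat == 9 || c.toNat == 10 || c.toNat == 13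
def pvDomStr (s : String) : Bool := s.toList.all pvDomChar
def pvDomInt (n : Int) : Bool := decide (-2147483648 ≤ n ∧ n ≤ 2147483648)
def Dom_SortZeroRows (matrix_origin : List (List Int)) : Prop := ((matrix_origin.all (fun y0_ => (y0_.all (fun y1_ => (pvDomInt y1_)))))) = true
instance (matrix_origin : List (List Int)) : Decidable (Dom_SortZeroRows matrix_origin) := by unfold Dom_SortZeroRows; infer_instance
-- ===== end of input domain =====

-- B replaces A's zero-row index list + per-index membership scans by one forward pass
-- (collect non-zero rows, count zero rows, flag a non-zero row following a zero row): faster.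


-- ===== PORT A =====
def getZeroRows (matrix : List (List Int)) : List Int :=
  (PySem.List.pyRange 0 matrix.length 1).foldl (fun zr m =>
    if PySem.List.pyGetD matrix m [] = (PySem.List.pyGetD matrix m []).map (fun _ => (0 : Int))
    then zr ++ [m] else zr) []

def CheckFirstConditionRREF (matrix : List (List Int)) : Bool :=
  let zerorows := getZeroRows matrix
  if ¬ (zerorows = []) then
    (PySem.List.pyRange 1 (zerorows.length + 1) 1).all
      (fun i => decide (((matrix.length : Int) - i) ∈ zerorows))
  else true

def SortZeroRows (matrix_origin : List (List Int)) : List (List Int) :=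
  let matrix := matrix_origin
  let zerorows := getZeroRows matrix
  if ¬ (zerorows = []) ∧ ¬ (CheckFirstConditionRREF matrix = true) then
    let modifiedmat := (PySem.List.pyRange 0 matrix.length 1).foldl (fun acc m =>
      if ¬ (m ∈ zerorows) then acc ++ [PySem.List.pyGetD matrix m []] else acc) []
    (PySem.List.pyRange 0 ((zerorows.length : Int)) 1).foldl (fun acc _ =>
      acc ++ [(PySem.List.pyGetD matrix 0 []).map (fun _ => (0 : Int))]) modifiedmat
  else matrix

-- ===== PORT B =====
def SortZeroRows_alt (matrix_origin : List (List Int)) : List (List Int) :=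
  let st := matrix_origin.foldl
    (fun (st : List (List Int) × Nat × Bool) row =>
      if row.all (fun x => x == 0) then (st.1, st.2.1 + 1, st.2.2)
      else (st.1 ++ [row], st.2.1, if st.2.1 > 0 then false else st.2.2))
    ([], 0, true)
  if st.2.1 = 0 ∨ st.2.2 = true then matrix_origin
  else st.1 ++ List.replicate st.2.1 ((PySem.List.pyGetD matrix_origin 0 []).map (fun _ => (0 : Int)))

-- ===== PRECONDITION & SPEC =====
def Spec_SortZeroRows (matrix_origin : List (List Int)) (out : List (List Int)) : Prop := out = SortZeroRows_alt matrix_origin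
instance (matrix_origin : List (List Int)) (out : List (List Int)) : Decidable (Spec_SortZeroRows matrix_origin out) := by unfold Spec_SortZeroRows; infer_instance

-- ===== CLAIM (what is proved, stated in full; the proofs are below) =====
def Claim_equal_SortZeroRows : Prop := ∀ (matrix_origin : List (List Int)), Dom_SortZeroRows matrix_origin → Spec_SortZeroRows matrix_origin (SortZeroRows matrix_origin)

-- ===== LEMMAS AND PROOFS =====

-- a row is "zero" iff all entries are 0 (B's test)
def isZ (r : List Int) : Bool := r.all (fun x => x == 0)

-- "the zero rows form a suffix"
def sortedB : List (List Int) → Bool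
  | [] => true
  | r :: rs => if isZ r then rs.all isZ else sortedB rs

-- A's row-equality test agrees with B's all-zero test
theorem eq_map_zero_iff_isZ (r : List Int) :
    (r = r.map (fun _ => (0 : Int))) ↔ isZ r = true := by
  simp [isZ, List.eq_replicate_iff]

theorem decide_eq_isZ (r : List Int) :
    decide (r = r.map (fun _ => (0 : Int))) = isZ r := by
  rw [Bool.eq_iff_iff, decide_eq_true_eq, eq_map_zero_iff_isZ]

-- index-filter / element-filter correspondence (the heart of A's index-based loops)
theorem range_filter_getD (m : List (List Int)) (p : List Int → Bool) :
    ((List.range m.length).filter (fun i => p (m.getD i []))).map (fun i => m.getD i [])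
      = m.filter p := by
  induction m with
  | nil => simp
  | cons r rs ih =>
      rw [List.length_cons, List.range_succ_eq_map, List.filter_cons, List.filter_map]
      simp only [List.getD_cons_zero, List.getD_cons_succ, Function.comp_def]
      simp only [List.getD_eq_getElem?_getD] at ih
      by_cases h : p r = true
      · simp [h, List.map_map, Function.comp_def, ih]
      · simp [h, List.map_map, Function.comp_def, ih]

theorem getZeroRows_eq (m : List (List Int)) :
    getZeroRows m
      = ((List.range m.length).filter (fun i => isZ (m.getD i []))).map (fun i : Nat => (i : Int)) := by
  unfold getZeroRows
  rw [PySem.List.pyRange_zero_natCast, List.foldl_map]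
  rw [PySem.List.foldl_append_ite
        (p := fun k : Nat => PySem.List.pyGetD m (k : Int) [] = (PySem.List.pyGetD m (k : Int) []).map (fun _ => (0 : Int)))
        (f := fun k : Nat => (k : Int))]
  simp only [List.nil_append]
  exact congrArg (List.map (fun i : Nat => (i : Int)))
    (List.filter_congr (fun i _ => by rw [decide_eq_isZ, PySem.List.pyGetD_natCast]))

theorem mem_getZeroRows (m : List (List Int)) (j : Nat) :
    ((j : Int) ∈ getZeroRows m) ↔ (j < m.length ∧ isZ (m.getD j []) = true) := by
  rw [getZeroRows_eq]
  simp [List.mem_filter]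

theorem getZeroRows_nil_iff (m : List (List Int)) :
    getZeroRows m = [] ↔ m.filter isZ = [] := by
  rw [getZeroRows_eq, List.map_eq_nil_iff, ← range_filter_getD m isZ, List.map_eq_nil_iff]

theorem getZeroRows_length (m : List (List Int)) :
    (getZeroRows m).length = (m.filter isZ).length := by
  have h := congrArg List.length (range_filter_getD m isZ)
  simpa [getZeroRows_eq] using h

-- suffix-of-zeros characterisations
theorem drop_all_iff (m : List (List Int)) (d : Nat) :
    ((m.drop d).all isZ = true) ↔ ∀ j, d ≤ j → j < m.length → isZ (m.getD j []) = true := by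
  rw [List.all_eq_true]
  constructor
  · intro h j hd hj
    have ht : j - d < (m.drop d).length := by rw [List.length_drop]; omega
    have hmem : (m.drop d)[j - d] ∈ m.drop d := List.getElem_mem ht
    have he : (m.drop d)[j - d] = m[j]'hj := by
      rw [List.getElem_drop]; congr 1; omega
    have := h _ hmem
    rw [he] at this
    rwa [List.getD_eq_getElem?_getD, List.getElem?_eq_getElem hj]
  · intro h x hx
    obtain ⟨t, ht, rfl⟩ := List.mem_iff_getElem.mp hx
    rw [List.getElem_drop]
    have hlt : d + t < m.length := by rw [List.length_drop] at ht; omega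
    have := h (d + t) (by omega) hlt
    rwa [List.getD_eq_getElem?_getD, List.getElem?_eq_getElem hlt] at this

theorem filter_len_of_drop_all (m : List (List Int)) (d : Nat)
    (h : (m.drop d).all isZ = true) : m.length - d ≤ (m.filter isZ).length := by
  have h1 : (m.drop d).filter isZ = m.drop d :=
    List.filter_eq_self.mpr (fun a ha => (List.all_eq_true.mp h) a ha)
  have h2 : m.filter isZ = (m.take d).filter isZ ++ (m.drop d).filter isZ := by
    rw [← List.filter_append, List.take_append_drop]
  have h3 := congrArg List.length h2
  rw [List.length_append, h1, List.length_drop] at h3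
  omega

theorem all_imp_filter_len (m : List (List Int)) (h : m.all isZ = true) :
    (m.filter isZ).length = m.length := by
  rw [List.filter_eq_self.mpr (fun a ha => (List.all_eq_true.mp h) a ha)]

theorem sortedB_iff_drop (m : List (List Int)) :
    sortedB m = true ↔ ((m.drop (m.length - (m.filter isZ).length)).all isZ = true) := by
  induction m with
  | nil => simp [sortedB]
  | cons r rs ih =>
      have hkle : (rs.filter isZ).length ≤ rs.length := List.length_filter_le _ _
      by_cases h : isZ r = true
      · rw [List.filter_cons_of_pos h]
        simp only [sortedB, if_pos h, List.length_cons]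
        have harith : rs.length + 1 - ((rs.filter isZ).length + 1)
            = rs.length - (rs.filter isZ).length := by omega
        rw [harith]
        by_cases hk : (rs.filter isZ).length = rs.length
        · rw [hk, Nat.sub_self, List.drop_zero, List.all_cons, h, Bool.true_and]
        · have hlt : (rs.filter isZ).length < rs.length := lt_of_le_of_ne hkle hk
          constructor
          · intro ha
            exact absurd (all_imp_filter_len rs ha) hk
          · intro ha
            have hd : (r :: rs).drop (rs.length - (rs.filter isZ).length)
                = rs.drop (rs.length - (rs.filter isZ).length - 1) := by
              obtain ⟨e, he⟩ : ∃ e, rs.length - (rs.filter isZ).length = e + 1 :=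
                ⟨rs.length - (rs.filter isZ).length - 1, by omega⟩
              rw [he, List.drop_succ_cons, Nat.add_sub_cancel]
            rw [hd] at ha
            have := filter_len_of_drop_all rs _ ha
            omega
      · rw [List.filter_cons_of_neg (by simp [h])]
        simp only [sortedB, if_neg (by simp [h] : ¬ isZ r = true), List.length_cons]
        have harith : rs.length + 1 - (rs.filter isZ).length
            = (rs.length - (rs.filter isZ).length) + 1 := by omega
        rw [harith, List.drop_succ_cons]
        exact ih

theorem sortedB_of_no_zero (m : List (List Int)) (h : m.filter isZ = []) :
    sortedB m = true := by
  induction m with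
  | nil => rfl
  | cons r rs ih =>
      rw [List.filter_cons] at h
      by_cases hr : isZ r = true
      · rw [if_pos hr] at h; exact absurd h (by simp)
      · rw [if_neg hr] at h
        simp only [sortedB, if_neg hr]
        exact ih h

theorem check_eq_sortedB (m : List (List Int)) :
    CheckFirstConditionRREF m = sortedB m := by
  unfold CheckFirstConditionRREF
  by_cases hz : getZeroRows m = []
  · rw [if_neg (by simpa using hz)]
    exact (sortedB_of_no_zero m ((getZeroRows_nil_iff m).mp hz)).symm
  · rw [if_pos (by simpa using hz)]
    have hlen : (getZeroRows m).length = (m.filter isZ).length := getZeroRows_length m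
    have hkle : (m.filter isZ).length ≤ m.length := List.length_filter_le _ _
    rw [Bool.eq_iff_iff, hlen, List.all_eq_true, sortedB_iff_drop, drop_all_iff]
    constructor
    · intro h j hd hj
      have h1 : ((m.length : Int) - (m.length - j : Nat)) ∈ getZeroRows m := by
        have := h ((m.length - j : Nat) : Int)
          (by rw [PySem.List.mem_pyRange_one]; omega)
        simpa using this
      have h2 : ((m.length : Int) - ((m.length - j : Nat) : Int)) = (j : Int) := by
        omega
      rw [h2] at h1
      exact ((mem_getZeroRows m j).mp h1).2
    · intro h i hi
      rw [PySem.List.mem_pyRange_one] at hi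
      have hj : ((m.length : Int) - i) = ((m.length - i.toNat : Nat) : Int) := by
        omega
      simp only [decide_eq_true_eq]
      rw [hj, mem_getZeroRows]
      refine ⟨by omega, h (m.length - i.toNat) (by omega) (by omega)⟩

-- A's first loop builds the non-zero rows in order
theorem firstLoop_eq (m : List (List Int)) :
    ((PySem.List.pyRange 0 m.length 1).foldl (fun acc j =>
        if ¬ (j ∈ getZeroRows m) then acc ++ [PySem.List.pyGetD m j []] else acc) [])
      = m.filter (fun r => !isZ r) := by
  rw [PySem.List.pyRange_zero_natCast, List.foldl_map]
  rw [PySem.List.foldl_append_ite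
        (p := fun k : Nat => ¬ ((k : Int) ∈ getZeroRows m))
        (f := fun k : Nat => PySem.List.pyGetD m (k : Int) [])]
  simp only [List.nil_append]
  rw [List.filter_congr (fun i hi => by
        rw [List.mem_range] at hi
        simp [mem_getZeroRows, hi] : ∀ i ∈ List.range m.length,
          (decide ¬((i : Int) ∈ getZeroRows m)) = !isZ (m.getD i []))]
  simp only [PySem.List.pyGetD_natCast]
  exact range_filter_getD m (fun r => !isZ r)

-- B's fold state
theorem bfold (xs : List (List Int)) (nz : List (List Int)) (c : Nat) (f : Bool) :
    xs.foldl
      (fun (st : List (List Int) × Nat × Bool) row =>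
        if row.all (fun x => x == 0) then (st.1, st.2.1 + 1, st.2.2)
        else (st.1 ++ [row], st.2.1, if st.2.1 > 0 then false else st.2.2))
      (nz, c, f)
    = (nz ++ xs.filter (fun r => !isZ r),
       c + (xs.filter isZ).length,
       f && (if c = 0 then sortedB xs else xs.all isZ)) := by
  induction xs generalizing nz c f with
  | nil => simp [sortedB]
  | cons r rs ih =>
      by_cases h : isZ r = true
      · have h' : r.all (fun x => x == 0) = true := h
        rw [List.foldl_cons, if_pos h', ih,
            List.filter_cons_of_pos h, List.filter_cons_of_neg (by simp [h])]
        have hn : c + 1 + (rs.filter isZ).length = c + (r :: rs.filter isZ).length := by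
          rw [List.length_cons]; omega
        have h3 : (if c + 1 = 0 then sortedB rs else rs.all isZ)
            = (if c = 0 then sortedB (r :: rs) else (r :: rs).all isZ) := by
          by_cases hc : c = 0
          · subst hc; rw [if_neg (by omega), if_pos rfl]; simp [sortedB, h]
          · rw [if_neg (by omega), if_neg hc]; simp [h]
        rw [hn, h3]
      · have hz : isZ r = false := by cases hb : isZ r <;> simp_all
        have h' : r.all (fun x => x == 0) = false := hz
        rw [List.foldl_cons, if_neg (by simp [h']), ih,
            List.filter_cons_of_pos (p := fun r => !isZ r) (by simp [hz]),
            List.filter_cons_of_neg (p := isZ) (by simp [hz])]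
        have h3 : ((if c > 0 then false else f) && (if c = 0 then sortedB rs else rs.all isZ))
            = (f && (if c = 0 then sortedB (r :: rs) else (r :: rs).all isZ)) := by
          by_cases hc : c = 0
          · subst hc; simp [sortedB, hz]
          · simp [hc, Nat.pos_of_ne_zero hc, hz]
        rw [h3]
        simp [List.append_assoc]

theorem SortZeroRows_eq_alt (m : List (List Int)) : SortZeroRows m = SortZeroRows_alt m := by
  unfold SortZeroRows SortZeroRows_alt
  rw [bfold]
  simp only [List.nil_append, Nat.zero_add, Bool.true_and, if_true]
  have hiff : (¬ (getZeroRows m = []) ∧ ¬ (CheckFirstConditionRREF m = true)) ↔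
      ¬ ((m.filter isZ).length = 0 ∨ sortedB m = true) := by
    rw [check_eq_sortedB, getZeroRows_nil_iff, ← List.length_eq_zero_iff]
    tauto
  by_cases hc : ((m.filter isZ).length = 0 ∨ sortedB m = true)
  · rw [if_neg (fun hA => (hiff.mp hA) hc), if_pos hc]
  · rw [if_pos (hiff.mpr hc), if_neg hc]
    rw [firstLoop_eq,
        PySem.List.foldl_append_singleton_eq_map
          (f := fun _ : Int => (PySem.List.pyGetD m 0 []).map (fun _ => (0 : Int))),
        List.map_const', PySem.List.length_pyRange_one]
    simp [getZeroRows_length]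

-- ===== VERDICT (by name: the statement is the Claim_ definition above) =====
theorem SortZeroRows_spec : Claim_equal_SortZeroRows := by
  intro m _; exact SortZeroRows_eq_alt m
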